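-- pv_equiv track=rewrite | github.com/Hakir-Mubarmaj/ml-qem-boosting | src/experiments/run_group_ensemble.py | group_by_block
-- ===== SOURCE A (Python) =====
-- from typing import List, Dict, Any, Tuple
--
-- def group_by_block(feature_names: List[str], n_blocks: int) -> Dict[str, List[str]]:
--     groups = {}
--     n = len(feature_names)
--     block_size = max(1, n // n_blocks)
--     for i in range(n_blocks):
--         start = i * block_size
--         end = None if i == n_blocks - 1 else (i + 1) * block_size
--         sel = feature_names[start:end]
--         groups[f'block_{i}'] = sel
--     return groups
-- ===== SOURCE B (Python) =====
-- def group_by_block(feature_names, n_blocks):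
--     # Single distributing pass: each name goes straight to its block, instead of
--     # one slice-copy pass per block.
--     n = len(feature_names)
--     block_size = max(1, n // n_blocks)
--     groups = {f'block_{i}': [] for i in range(n_blocks)}
--     if n_blocks > 0:
--         last = n_blocks - 1
--         for j, name in enumerate(feature_names):
--             groups[f'block_{min(j // block_size, last)}'].append(name)
--     return groups
-- ===== Notes on version B (the rewrite author's own statement) =====
-- stated objective: alternative
-- what changed: A builds each block with a separate slice pass (one slice copy per block index); B pre-builds empty blocks and makes a single distributing pass over the names, sending element j straight to block min(j // block_size, n_blocks - 1).
import Mathlib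
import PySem

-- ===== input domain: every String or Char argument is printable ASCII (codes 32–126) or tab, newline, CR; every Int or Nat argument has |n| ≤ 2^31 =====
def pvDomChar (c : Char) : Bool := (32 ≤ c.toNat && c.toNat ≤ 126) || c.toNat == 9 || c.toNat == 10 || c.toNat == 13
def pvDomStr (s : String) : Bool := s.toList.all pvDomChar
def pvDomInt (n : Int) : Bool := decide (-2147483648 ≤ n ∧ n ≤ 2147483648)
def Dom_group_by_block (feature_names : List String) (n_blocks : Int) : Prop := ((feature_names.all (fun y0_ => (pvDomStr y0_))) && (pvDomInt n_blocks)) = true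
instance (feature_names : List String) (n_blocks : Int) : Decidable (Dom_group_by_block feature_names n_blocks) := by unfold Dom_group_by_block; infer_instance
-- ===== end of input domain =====

-- B replaces A's per-block slice-copy loop by a single pass that distributes each
-- name directly into pre-built empty blocks (same cost class; alternative algorithm).


-- ===== PORT A =====
-- f'block_{i}' (the key format both Pythons use)
def pvKey (i : Int) : String := "block_" ++ PySem.Int.toStr i

def group_by_block (feature_names : List String) (n_blocks : Int) : List (String × List String) :=
  let n : Int := feature_names.length
  let block_size : Int := max 1 (PySem.Int.floordiv n n_blocks)
  ((PySem.List.pyRange 0 n_blocks 1).foldl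
    (fun groups i =>
      groups.insert (pvKey i)
        (PySem.List.slice feature_names (some (i * block_size))
          (if i == n_blocks - 1 then none else some ((i + 1) * block_size))))
    (PySem.Dict.empty : PySem.Dict String (List String))).items

-- ===== PORT B =====
def group_by_block_alt (feature_names : List String) (n_blocks : Int) : List (String × List String) :=
  let n : Int := feature_names.length
  let block_size : Int := max 1 (PySem.Int.floordiv n n_blocks)
  let groups : PySem.Dict String (List String) :=
    (PySem.List.pyRange 0 n_blocks 1).foldl (fun g i => g.insert (pvKey i) []) PySem.Dict.empty
  let groups :=
    if n_blocks > 0 then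
      (PySem.List.enumerate feature_names 0).foldl
        (fun g p =>
          g.modify (pvKey (min (PySem.Int.floordiv p.1 block_size) (n_blocks - 1))) [] (· ++ [p.2]))
        groups
    else groups
  groups.items

-- ===== PRECONDITION & SPEC =====
-- Pre_ excludes only n_blocks = 0, where Python's 'n // n_blocks' raises ZeroDivisionError (in A and in B alike).
def Pre_group_by_block (feature_names : List String) (n_blocks : Int) : Prop := n_blocks ≠ 0
instance (feature_names : List String) (n_blocks : Int) : Decidable (Pre_group_by_block feature_names n_blocks) := by unfold Pre_group_by_block; infer_instance
def pvWitness_group_by_block : List String × Int := (["a", "b", "c"], 2)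

def Spec_group_by_block (feature_names : List String) (n_blocks : Int) (out : List (String × List String)) : Prop := out = group_by_block_alt feature_names n_blocks
instance (feature_names : List String) (n_blocks : Int) (out : List (String × List String)) : Decidable (Spec_group_by_block feature_names n_blocks out) := by unfold Spec_group_by_block; infer_instance

-- ===== CLAIM (what is proved, stated in full; the proofs are below) =====
def Claim_equal_group_by_block : Prop := ∀ (feature_names : List String) (n_blocks : Int), Dom_group_by_block feature_names n_blocks → Pre_group_by_block feature_names n_blocks → Spec_group_by_block feature_names n_blocks (group_by_block feature_names n_blocks)

-- ===== LEMMAS AND PROOFS =====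

def pvBS (feature_names : List String) (n_blocks : Int) : Int :=
  max 1 (PySem.Int.floordiv (feature_names.length : Int) n_blocks)

def pvBucket (feature_names : List String) (n_blocks i : Int) : List String :=
  if i = n_blocks - 1 then feature_names.drop ((i * pvBS feature_names n_blocks).toNat)
  else (feature_names.drop ((i * pvBS feature_names n_blocks).toNat)).take (pvBS feature_names n_blocks).toNat

lemma pvDigitChar_inj (a b : Nat) (ha : a < 10) (hb : b < 10)
    (h : Nat.digitChar a = Nat.digitChar b) : a = b := by
  have H : ∀ x y : Fin 10, Nat.digitChar x.val = Nat.digitChar y.val → x = y := by decide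
  exact congrArg Fin.val (H ⟨a, ha⟩ ⟨b, hb⟩ h)

lemma pvCore_append : ∀ (f n : Nat) (ds : List Char),
    Nat.toDigitsCore 10 f n ds = Nat.toDigitsCore 10 f n [] ++ ds := by
  intro f
  induction f with
  | zero => intro n ds; simp [Nat.toDigitsCore]
  | succ f ih =>
    intro n ds
    simp only [Nat.toDigitsCore]
    by_cases h : n / 10 = 0
    · simp [h]
    · simp only [h, if_false]
      rw [ih (n / 10) (Nat.digitChar (n % 10) :: ds), ih (n / 10) [Nat.digitChar (n % 10)]]
      simp

lemma pvCore_fuel : ∀ (n f f' : Nat), n < f → n < f' →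
    Nat.toDigitsCore 10 f n [] = Nat.toDigitsCore 10 f' n [] := by
  intro n
  induction n using Nat.strong_induction_on with
  | _ n ih =>
    intro f f' hf hf'
    match f, f', hf, hf' with
    | f+1, f'+1, hf, hf' =>
      simp only [Nat.toDigitsCore]
      by_cases h : n / 10 = 0
      · simp [h]
      · simp only [h, if_false]
        rw [pvCore_append f, pvCore_append f']
        have hlt : n / 10 < n := Nat.div_lt_self (Nat.pos_of_ne_zero (by omega)) (by omega)
        rw [ih (n / 10) hlt f f' (by omega) (by omega)]

lemma pvRep_lt (n : Nat) (h : n < 10) : Nat.toDigits 10 n = [Nat.digitChar n] := by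
  have h1 : n / 10 = 0 := Nat.div_eq_of_lt h
  have h2 : n % 10 = n := Nat.mod_eq_of_lt h
  simp [Nat.toDigits, Nat.toDigitsCore, h1, h2]

lemma pvRep_ge (n : Nat) (h : 10 ≤ n) :
    Nat.toDigits 10 n = Nat.toDigits 10 (n / 10) ++ [Nat.digitChar (n % 10)] := by
  have h1 : n / 10 ≠ 0 := by
    have := Nat.div_le_div_right (c := 10) h
    simp at this; omega
  show Nat.toDigitsCore 10 (n+1) n [] = _
  simp only [Nat.toDigitsCore, h1, if_false]
  rw [pvCore_append n (n / 10)]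
  have hlt : n / 10 < n := Nat.div_lt_self (by omega) (by omega)
  rw [pvCore_fuel (n / 10) n (n / 10 + 1) hlt (by omega)]
  rfl

lemma pvRep_ne_nil (n : Nat) : Nat.toDigits 10 n ≠ [] := by
  by_cases h : n < 10
  · simp [pvRep_lt n h]
  · rw [pvRep_ge n (by omega)]; simp

lemma pvToDigits_inj : ∀ (m n : Nat), Nat.toDigits 10 m = Nat.toDigits 10 n → m = n := by
  intro m
  induction m using Nat.strong_induction_on with
  | _ m ih =>
    intro n h
    by_cases hm : m < 10 <;> by_cases hn : n < 10
    · rw [pvRep_lt m hm, pvRep_lt n hn] at h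
      exact pvDigitChar_inj m n hm hn (by simpa using h)
    · exfalso
      rcases List.exists_cons_of_ne_nil (pvRep_ne_nil (n / 10)) with ⟨c, t, hct⟩
      rw [pvRep_lt m hm, pvRep_ge n (by omega), hct] at h
      have hl := congrArg List.length h
      simp at hl
    · exfalso
      rcases List.exists_cons_of_ne_nil (pvRep_ne_nil (m / 10)) with ⟨c, t, hct⟩
      rw [pvRep_ge m (by omega), pvRep_lt n hn, hct] at h
      have hl := congrArg List.length h
      simp at hl
    · rw [pvRep_ge m (by omega), pvRep_ge n (by omega)] at h
      obtain ⟨h1, h2⟩ := List.append_inj' h (by simp)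
      have e1 : m / 10 = n / 10 := ih (m / 10) (Nat.div_lt_self (by omega) (by omega)) _ h1
      have e2 : m % 10 = n % 10 :=
        pvDigitChar_inj _ _ (Nat.mod_lt _ (by omega)) (Nat.mod_lt _ (by omega)) (by simpa using h2)
      omega

lemma pvKey_inj (a b : Int) (ha : 0 ≤ a) (hb : 0 ≤ b) (h : pvKey a = pvKey b) : a = b := by
  unfold pvKey at h
  have h2 : ("block_" ++ PySem.Int.toStr a).toList = ("block_" ++ PySem.Int.toStr b).toList :=
    congrArg String.toList h
  simp [String.toList_append] at h2
  unfold PySem.Int.toChars at h2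
  rw [if_neg (by omega), if_neg (by omega)] at h2
  have := pvToDigits_inj a.toNat b.toNat h2
  omega

lemma pvFilter_ge_all {α : Type} (xs : List α) : ∀ (s a : Int), a ≤ s →
    (PySem.List.enumerate xs s).filter (fun p => decide (a ≤ p.1)) = PySem.List.enumerate xs s := by
  induction xs with
  | nil => intro s a _; simp [PySem.List.enumerate_nil]
  | cons x xs ih =>
    intro s a has
    rw [PySem.List.enumerate_cons]
    simp only [List.filter_cons]
    rw [if_pos (by simpa using has)]
    rw [ih (s+1) a (by omega)]

lemma pvFilter_ge {α : Type} (xs : List α) : ∀ (s : Int) (k : Nat),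
    (PySem.List.enumerate xs s).filter (fun p => decide (s + (k : Int) ≤ p.1))
      = PySem.List.enumerate (xs.drop k) (s + (k : Int)) := by
  induction xs with
  | nil => intro s k; simp [PySem.List.enumerate_nil]
  | cons x xs ih =>
    intro s k
    rw [PySem.List.enumerate_cons]
    cases k with
    | zero =>
      simp only [List.filter_cons, Nat.cast_zero, add_zero, List.drop_zero]
      rw [if_pos (by simp)]
      rw [PySem.List.enumerate_cons]
      have := pvFilter_ge_all xs (s+1) s (by omega)
      simpa using this
    | succ k =>
      simp only [List.filter_cons]
      rw [if_neg (by simp)]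
      have := ih (s+1) k
      have e : s + 1 + (k : Int) = s + ((k:Nat)+1 : Nat) := by push_cast; ring
      rw [e] at this
      simpa using this

lemma pvFilter_lt_nil {α : Type} (xs : List α) : ∀ (s b : Int), b ≤ s →
    (PySem.List.enumerate xs s).filter (fun p => decide (p.1 < b)) = [] := by
  induction xs with
  | nil => intro s b _; simp [PySem.List.enumerate_nil]
  | cons x xs ih =>
    intro s b hbs
    rw [PySem.List.enumerate_cons]
    simp only [List.filter_cons]
    rw [if_neg (by simp; omega)]
    exact ih (s+1) b (by omega)

lemma pvFilter_lt {α : Type} (xs : List α) : ∀ (s b : Int),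
    ((PySem.List.enumerate xs s).filter (fun p => decide (p.1 < b))).map (·.2)
      = xs.take (b - s).toNat := by
  induction xs with
  | nil => intro s b; simp [PySem.List.enumerate_nil]
  | cons x xs ih =>
    intro s b
    rw [PySem.List.enumerate_cons]
    simp only [List.filter_cons]
    by_cases h : s < b
    · rw [if_pos (by simpa using h)]
      have e : (b - s).toNat = (b - (s+1)).toNat + 1 := by omega
      rw [e]
      simp only [List.map_cons, List.take_succ_cons]
      rw [ih (s+1) b]
    · rw [if_neg (by simpa using h)]
      rw [pvFilter_lt_nil xs (s+1) b (by omega)]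
      have e : (b - s).toNat = 0 := by omega
      simp [e]

lemma pvFilter_ge' {α : Type} (xs : List α) (a : Int) (ha : 0 ≤ a) :
    (PySem.List.enumerate xs 0).filter (fun p => decide (a ≤ p.1))
      = PySem.List.enumerate (xs.drop a.toNat) a := by
  have h := pvFilter_ge xs 0 a.toNat
  simp only [zero_add, Int.toNat_of_nonneg ha] at h
  exact h

lemma pvKeys_nodup (nb : Int) : ((PySem.List.pyRange 0 nb 1).map pvKey).Nodup := by
  rw [PySem.List.pyRange_one, List.map_map]
  apply List.Nodup.map ?_ (List.nodup_range)
  intro x y hxy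
  have h2 : (0:Int) + x = 0 + y := pvKey_inj _ _ (by positivity) (by positivity) hxy
  omega

lemma pvSet_update_self (s xs : List String) (h : ∀ x ∈ xs, x ∈ s) :
    PySem.Set.update s xs = s := by
  induction xs with
  | nil => rfl
  | cons x xs ih =>
    have hx : x ∈ s := h x (by simp)
    have : PySem.Set.add s x = s := by
      simp [PySem.Set.add, PySem.Set.contains, hx]
    simp only [PySem.Set.update, List.foldl_cons, this]
    exact ih (fun y hy => h y (by simp [hy]))

lemma pvItemsA (fn : List String) (nb : Int) :
    group_by_block fn nb
      = (PySem.List.pyRange 0 nb 1).map (fun i => (pvKey i,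
          PySem.List.slice fn (some (i * pvBS fn nb))
            (if i == nb - 1 then none else some ((i + 1) * pvBS fn nb)))) := by
  show ((PySem.List.pyRange 0 nb 1).foldl
    (fun groups i =>
      groups.insert (pvKey i)
        (PySem.List.slice fn (some (i * pvBS fn nb))
          (if i == nb - 1 then none else some ((i + 1) * pvBS fn nb))))
    (PySem.Dict.empty : PySem.Dict String (List String))).items = _
  rw [PySem.Dict.items_foldl_insert_fresh _ pvKey _ _
    (fun a _ => PySem.Dict.contains_empty _) (pvKeys_nodup nb)]
  simp [PySem.Dict.empty]

lemma pvA_neg (fn : List String) (nb : Int) (h : nb ≤ 0) : group_by_block fn nb = [] := by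
  rw [pvItemsA, PySem.List.pyRange_one]
  have e : nb.toNat = 0 := by omega
  simp [e]

lemma pvB_neg (fn : List String) (nb : Int) (h : nb ≤ 0) : group_by_block_alt fn nb = [] := by
  show (if nb > 0 then _ else (PySem.List.pyRange 0 nb 1).foldl
      (fun g i => g.insert (pvKey i) []) PySem.Dict.empty : PySem.Dict String (List String)).items = []
  rw [if_neg (not_lt.mpr h)]
  rw [PySem.List.pyRange_one]
  have e : nb.toNat = 0 := by omega
  simp [e, PySem.Dict.empty]

lemma pvA_eq_buckets (fn : List String) (nb : Int) :
    group_by_block fn nb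
      = (PySem.List.pyRange 0 nb 1).map (fun i => (pvKey i, pvBucket fn nb i)) := by
  rw [pvItemsA]
  apply List.map_congr_left
  intro i hi
  obtain ⟨hi0, hilt⟩ := PySem.List.mem_pyRange_one.mp hi
  have hbs1 : (1:Int) ≤ pvBS fn nb := le_max_left _ _
  have hmn : 0 ≤ i * pvBS fn nb := mul_nonneg hi0 (by omega)
  by_cases hlast : i = nb - 1
  · have e1 : (i == nb - 1) = true := by simp [hlast]
    simp only [e1, if_true]
    rw [PySem.List.slice_from fn hmn]
    unfold pvBucket
    rw [if_pos hlast]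
  · have e1 : (i == nb - 1) = false := by simp [hlast]
    simp only [e1, Bool.false_eq_true, if_false]
    rw [PySem.List.slice_toNat fn hmn (by positivity)]
    have e2 : (i + 1) * pvBS fn nb = i * pvBS fn nb + pvBS fn nb := by ring
    have e3 : ((i + 1) * pvBS fn nb).toNat - (i * pvBS fn nb).toNat = (pvBS fn nb).toNat := by
      rw [e2]; omega
    rw [e3]
    unfold pvBucket
    rw [if_neg hlast]

lemma pvPred_last (bs nb : Int) (hbs : 0 < bs) (hnb : 0 < nb) (j : Int) (hj : 0 ≤ j) :
    (pvKey (min (PySem.Int.floordiv j bs) (nb - 1)) == pvKey (nb - 1))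
      = decide ((nb - 1) * bs ≤ j) := by
  have hq0 : 0 ≤ PySem.Int.floordiv j bs := by
    rw [PySem.Int.floordiv_eq_ediv_of_pos hbs]; exact Int.ediv_nonneg hj hbs.le
  rw [Bool.eq_iff_iff]
  simp only [beq_iff_eq, decide_eq_true_eq]
  constructor
  · intro he
    have hmin : min (PySem.Int.floordiv j bs) (nb - 1) = nb - 1 :=
      pvKey_inj _ _ (by omega) (by omega) he
    exact (PySem.Int.le_floordiv_iff_mul_le hbs).mp (by omega)
  · intro hle
    have hge : nb - 1 ≤ PySem.Int.floordiv j bs := (PySem.Int.le_floordiv_iff_mul_le hbs).mpr hle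
    have hmin : min (PySem.Int.floordiv j bs) (nb - 1) = nb - 1 := by omega
    rw [hmin]

lemma pvPred_mid (bs nb i : Int) (hbs : 0 < bs) (hi0 : 0 ≤ i) (hilt : i < nb - 1) (j : Int) (hj : 0 ≤ j) :
    (pvKey (min (PySem.Int.floordiv j bs) (nb - 1)) == pvKey i)
      = (decide (j < (i + 1) * bs) && decide (i * bs ≤ j)) := by
  have hq0 : 0 ≤ PySem.Int.floordiv j bs := by
    rw [PySem.Int.floordiv_eq_ediv_of_pos hbs]; exact Int.ediv_nonneg hj hbs.le
  rw [Bool.eq_iff_iff]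
  simp only [beq_iff_eq, decide_eq_true_eq, Bool.and_eq_true]
  constructor
  · intro he
    have hmin : min (PySem.Int.floordiv j bs) (nb - 1) = i :=
      pvKey_inj _ _ (by omega) hi0 he
    have hq : PySem.Int.floordiv j bs = i := by omega
    have hb := (PySem.Int.floordiv_eq_iff_of_pos hbs).mp hq
    exact ⟨hb.2, hb.1⟩
  · rintro ⟨h1, h2⟩
    have hq : PySem.Int.floordiv j bs = i := (PySem.Int.floordiv_eq_iff_of_pos hbs).mpr ⟨h2, h1⟩
    rw [hq, min_eq_left (by omega)]

lemma pvB_eq_buckets (fn : List String) (nb : Int) (h : 0 < nb) :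
    group_by_block_alt fn nb
      = (PySem.List.pyRange 0 nb 1).map (fun i => (pvKey i, pvBucket fn nb i)) := by
  have hbs1 : (1:Int) ≤ pvBS fn nb := le_max_left _ _
  have hbs : (0:Int) < pvBS fn nb := by omega
  have e0 : group_by_block_alt fn nb
      = (if nb > 0 then
          (PySem.List.enumerate fn 0).foldl
            (fun g p =>
              g.modify (pvKey (min (PySem.Int.floordiv p.1 (pvBS fn nb)) (nb - 1))) [] (· ++ [p.2]))
            ((PySem.List.pyRange 0 nb 1).foldl (fun g i => g.insert (pvKey i) []) PySem.Dict.empty)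
        else
          (PySem.List.pyRange 0 nb 1).foldl (fun g i => g.insert (pvKey i) []) PySem.Dict.empty).items := rfl
  rw [e0, if_pos h]
  set d0 : PySem.Dict String (List String) :=
    (PySem.List.pyRange 0 nb 1).foldl (fun g i => g.insert (pvKey i) []) PySem.Dict.empty with hd0
  have hd0items : d0.items = (PySem.List.pyRange 0 nb 1).map (fun i => (pvKey i, ([] : List String))) := by
    rw [hd0, PySem.Dict.items_foldl_insert_fresh _ pvKey _ _
      (fun a _ => PySem.Dict.contains_empty _) (pvKeys_nodup nb)]
    simp [PySem.Dict.empty]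
  have hd0keys : d0.keys = (PySem.List.pyRange 0 nb 1).map pvKey := by
    simp [PySem.Dict.keys, hd0items, List.map_map, Function.comp]
  have hnodup : d0.keys.Nodup := by rw [hd0keys]; exact pvKeys_nodup nb
  have e1 : (PySem.List.enumerate fn 0).foldl
      (fun g p =>
        g.modify (pvKey (min (PySem.Int.floordiv p.1 (pvBS fn nb)) (nb - 1))) [] (· ++ [p.2])) d0
      = ((PySem.List.enumerate fn 0).map
          (fun p => (pvKey (min (PySem.Int.floordiv p.1 (pvBS fn nb)) (nb - 1)), p.2))).foldl
          (fun g p => g.modify p.1 [] (· ++ [p.2])) d0 :=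
    (List.foldl_map
      (f := fun p : Int × String => (pvKey (min (PySem.Int.floordiv p.1 (pvBS fn nb)) (nb - 1)), p.2))
      (g := fun (g : PySem.Dict String (List String)) (q : String × String) =>
        g.modify q.1 [] (· ++ [q.2]))).symm
  rw [e1]
  set L := (PySem.List.enumerate fn 0).map
    (fun p => (pvKey (min (PySem.Int.floordiv p.1 (pvBS fn nb)) (nb - 1)), p.2)) with hL
  set F := L.foldl (fun g p => g.modify p.1 [] (· ++ [p.2])) d0 with hF
  have hj0 : ∀ p ∈ PySem.List.enumerate fn 0, (0:Int) ≤ p.1 := by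
    intro p hp
    obtain ⟨k, hk, rfl⟩ := (PySem.List.mem_enumerate_iff fn 0 p).mp hp
    simp
  have htgt : ∀ (j : Int), 0 ≤ j →
      0 ≤ min (PySem.Int.floordiv j (pvBS fn nb)) (nb - 1) ∧
      min (PySem.Int.floordiv j (pvBS fn nb)) (nb - 1) < nb := by
    intro j hj
    have hq0 : 0 ≤ PySem.Int.floordiv j (pvBS fn nb) := by
      rw [PySem.Int.floordiv_eq_ediv_of_pos hbs]; exact Int.ediv_nonneg hj hbs.le
    omega
  have hFkeys : F.keys = d0.keys := by
    rw [hF, PySem.Dict.keys_foldl_modify_key L Prod.fst [] (fun _ p => (· ++ [p.2])) d0]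
    apply pvSet_update_self
    intro x hx
    rw [hL, List.map_map] at hx
    obtain ⟨p, hp, rfl⟩ := List.mem_map.mp hx
    rw [hd0keys]
    refine List.mem_map.mpr ⟨min (PySem.Int.floordiv p.1 (pvBS fn nb)) (nb - 1), ?_, rfl⟩
    exact PySem.List.mem_pyRange_one.mpr (htgt p.1 (hj0 p hp))
  have hFnodup : F.keys.Nodup := by rw [hFkeys]; exact hnodup
  have hFitems : F.items = (PySem.List.pyRange 0 nb 1).map (fun i => (pvKey i, F.getD (pvKey i) [])) := by
    rw [PySem.Dict.items_eq_map_keys F hFnodup [], hFkeys, hd0keys, List.map_map]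
    rfl
  rw [hFitems]
  apply List.map_congr_left
  intro i hi
  obtain ⟨hi0, hilt⟩ := PySem.List.mem_pyRange_one.mp hi
  have hget : F.getD (pvKey i) [] = pvBucket fn nb i := by
    rw [hF, PySem.Dict.getD_foldl_modify_append L d0 (pvKey i)]
    have hd0get : d0.getD (pvKey i) [] = [] :=
      PySem.Dict.getD_of_mem_items d0
        (by rw [hd0items]
            exact List.mem_map.mpr ⟨i, PySem.List.mem_pyRange_one.mpr ⟨hi0, hilt⟩, rfl⟩)
        hnodup []
    rw [hd0get, List.nil_append, hL, List.filter_map, List.map_map]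
    have hmc : ((fun x : String × String => x.2) ∘
          (fun p : Int × String => (pvKey (min (PySem.Int.floordiv p.1 (pvBS fn nb)) (nb - 1)), p.2)))
        = (fun p : Int × String => p.2) := rfl
    by_cases hlast : i = nb - 1
    · subst hlast
      have hfc : List.filter
            ((fun p : String × String => p.1 == pvKey (nb - 1)) ∘
              (fun p : Int × String => (pvKey (min (PySem.Int.floordiv p.1 (pvBS fn nb)) (nb - 1)), p.2)))
            (PySem.List.enumerate fn 0)
          = List.filter (fun p : Int × String => decide ((nb - 1) * pvBS fn nb ≤ p.1))
            (PySem.List.enumerate fn 0) :=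
        List.filter_congr (fun p hp => pvPred_last (pvBS fn nb) nb hbs h p.1 (hj0 p hp))
      rw [hfc, hmc]
      rw [pvFilter_ge' fn ((nb - 1) * pvBS fn nb) (mul_nonneg (by omega) hbs.le)]
      rw [PySem.List.map_snd_enumerate]
      unfold pvBucket
      rw [if_pos rfl]
    · have hfc : List.filter
            ((fun p : String × String => p.1 == pvKey i) ∘
              (fun p : Int × String => (pvKey (min (PySem.Int.floordiv p.1 (pvBS fn nb)) (nb - 1)), p.2)))
            (PySem.List.enumerate fn 0)
          = List.filter (fun p : Int × String =>
              decide (p.1 < (i + 1) * pvBS fn nb) && decide (i * pvBS fn nb ≤ p.1))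
            (PySem.List.enumerate fn 0) :=
        List.filter_congr (fun p hp => pvPred_mid (pvBS fn nb) nb i hbs hi0 (by omega) p.1 (hj0 p hp))
      rw [hfc, hmc]
      rw [← List.filter_filter]
      rw [pvFilter_ge' fn (i * pvBS fn nb) (mul_nonneg hi0 hbs.le)]
      rw [pvFilter_lt (fn.drop (i * pvBS fn nb).toNat) (i * pvBS fn nb) ((i + 1) * pvBS fn nb)]
      have e2 : (i + 1) * pvBS fn nb - i * pvBS fn nb = pvBS fn nb := by ring
      rw [e2]
      unfold pvBucket
      rw [if_neg hlast]
  rw [hget]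

-- ===== VERDICT (by name: the statement is the Claim_ definition above) =====
theorem group_by_block_spec : Claim_equal_group_by_block := by
  intro fn nb _ _
  unfold Spec_group_by_block
  rcases lt_or_ge 0 nb with h | h
  · rw [pvA_eq_buckets fn nb, pvB_eq_buckets fn nb h]
  · rw [pvA_neg fn nb h, pvB_neg fn nb h]
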